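-- pv_equiv track=rewrite | github.com/ruimaranhao/AoC2017 | 15.py | jury_count
-- ===== SOURCE A (Python) =====
-- def next(prev, factor):
--     return (prev * factor) % 2147483647
--
-- def next_criteria(prev, factor, criteria):
--     res = (prev * factor) % 2147483647
--     if res % criteria == 0:
--         return res
--
--     return next_criteria(res, factor, criteria)
--
-- def jury_count(seedA=65, seedB=8921, trials=40_000_000, part1=True):
--     factA = 16807
--     factB = 48271
--
--     valueA = seedA
--     valueB = seedB
--
--     tries = 0
--     count = 0
--     while tries < trials:
--         if part1:
--             valueA = next(valueA, factA)
--             valueB = next(valueB, factB)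
--         else:
--             valueA = next_criteria(valueA, factA, 4)
--             valueB = next_criteria(valueB, factB, 8)
--
--         if (valueA & 0x0000FFFF) == (valueB & 0x0000FFFF):
--             count += 1
--
--         tries += 1
--
--     return count
-- ===== SOURCE B (Python) =====
-- def jury_count(seedA=65, seedB=8921, trials=40_000_000, part1=True):
--     M = 2147483647
--     a, b = seedA, seedB
--     count = 0
--     for _ in range(trials):
--         if part1:
--             a = (a * 16807) % M
--             b = (b * 48271) % M
--         else:
--             while True:
--                 a = (a * 16807) % M
--                 if a % 4 == 0:
--                     break
--             while True:
--                 b = (b * 48271) % M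
--                 if b % 8 == 0:
--                     break
--         if (a & 0xFFFF) == (b & 0xFFFF):
--             count += 1
--     return count
-- ===== Notes on version B (the rewrite author's own statement) =====
-- stated objective: idiomatic
-- what changed: Both helpers are inlined: the recursive next_criteria becomes an in-place while-True/break loop and the counted while-loop with tries accumulator becomes a for-range loop; same modular steps and comparison, so identical output.
import Mathlib
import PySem

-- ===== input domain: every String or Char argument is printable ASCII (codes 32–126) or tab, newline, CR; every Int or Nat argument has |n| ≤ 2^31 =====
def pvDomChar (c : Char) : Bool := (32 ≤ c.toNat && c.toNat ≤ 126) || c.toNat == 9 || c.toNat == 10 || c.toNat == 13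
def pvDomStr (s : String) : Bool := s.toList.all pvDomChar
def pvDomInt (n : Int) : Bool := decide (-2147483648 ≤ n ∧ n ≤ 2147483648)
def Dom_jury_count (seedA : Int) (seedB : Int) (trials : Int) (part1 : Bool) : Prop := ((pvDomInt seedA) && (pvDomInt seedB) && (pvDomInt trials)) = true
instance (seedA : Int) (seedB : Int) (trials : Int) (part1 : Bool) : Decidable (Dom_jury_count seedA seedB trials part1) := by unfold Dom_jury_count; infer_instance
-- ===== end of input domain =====

-- B inlines the two helper functions and replaces the recursive criteria search and
-- the counted while-loop by a while-True break loop inside a for-range loop (objective: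
-- idiomatic/alternative decomposition, same asymptotic cost).

-- ===== PORT A =====
-- A's helper `next`
def pvNext (prev factor : Int) : Int := PySem.Int.mod (prev * factor) 2147483647

-- A's helper `next_criteria`: Python's unbounded recursion, made total with a fuel
-- guard (the fuel only bounds the recursion depth; it changes no value Python returns).
def pvNextCriteria : Nat → Int → Int → Int → Int
  | 0, prev, _, _ => prev
  | f + 1, prev, factor, criteria =>
      let res := pvNext prev factor
      if PySem.Int.mod res criteria = 0 then res
      else pvNextCriteria f res factor criteria

-- A's `while tries < trials` loop; the state is (valueA, valueB, count), the remaining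
-- iteration count `trials - tries` is the recursion fuel.  `& 0xFFFF` is PySem.Int.band.
def pvJuryLoopA (part1 : Bool) : Nat → Int → Int → Int → Int
  | 0, _, _, count => count
  | n + 1, valueA, valueB, count =>
      let valueA' := if part1 then pvNext valueA 16807 else pvNextCriteria 2147483647 valueA 16807 4
      let valueB' := if part1 then pvNext valueB 48271 else pvNextCriteria 2147483647 valueB 48271 8
      let count' := if PySem.Int.band valueA' 0xFFFF = PySem.Int.band valueB' 0xFFFF then count + 1 else count
      pvJuryLoopA part1 n valueA' valueB' count'

def jury_count (seedA : Int) (seedB : Int) (trials : Int) (part1 : Bool) : Int :=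
  pvJuryLoopA part1 trials.toNat seedA seedB 0

-- ===== PORT B =====
-- B's inlined `while True: v = (v*fac) % M; if v % crit == 0: break` loop, with the same
-- fuel guard making it total.
def pvSearchB : Nat → Int → Int → Int → Int
  | 0, v, _, _ => v
  | f + 1, v, fac, crit =>
      let v' := PySem.Int.mod (v * fac) 2147483647
      if PySem.Int.mod v' crit = 0 then v' else pvSearchB f v' fac crit

-- B's body of the `for _ in range(trials)` loop, state (a, b, count)
def pvStepB (part1 : Bool) (st : Int × Int × Int) : Int × Int × Int :=
  let a' := if part1 then PySem.Int.mod (st.1 * 16807) 2147483647 else pvSearchB 2147483647 st.1 16807 4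
  let b' := if part1 then PySem.Int.mod (st.2.1 * 48271) 2147483647 else pvSearchB 2147483647 st.2.1 48271 8
  (a', b', if PySem.Int.band a' 0xFFFF = PySem.Int.band b' 0xFFFF then st.2.2 + 1 else st.2.2)

def jury_count_alt (seedA : Int) (seedB : Int) (trials : Int) (part1 : Bool) : Int :=
  ((PySem.List.pyRange 0 trials 1).foldl (fun st _ => pvStepB part1 st) (seedA, seedB, 0)).2.2

-- ===== PRECONDITION & SPEC =====
def Spec_jury_count (seedA : Int) (seedB : Int) (trials : Int) (part1 : Bool) (out : Int) : Prop := out = jury_count_alt seedA seedB trials part1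
instance (seedA : Int) (seedB : Int) (trials : Int) (part1 : Bool) (out : Int) : Decidable (Spec_jury_count seedA seedB trials part1 out) := by unfold Spec_jury_count; infer_instance

-- ===== CLAIM (what is proved, stated in full; the proofs are below) =====
def Claim_equal_jury_count : Prop := ∀ (seedA : Int) (seedB : Int) (trials : Int) (part1 : Bool), Dom_jury_count seedA seedB trials part1 → Spec_jury_count seedA seedB trials part1 (jury_count seedA seedB trials part1)

-- ===== LEMMAS AND PROOFS =====

-- A's recursive criteria search and B's while-True loop compute the same value
theorem pvSearch_eq (f : Nat) : ∀ (v fac crit : Int), pvNextCriteria f v fac crit = pvSearchB f v fac crit := by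
  induction f with
  | zero => intro v fac crit; rfl
  | succ f ih =>
      intro v fac crit
      simp only [pvNextCriteria, pvSearchB, pvNext]
      split <;> simp [ih]

-- A's counted while-loop equals B's foldl over any list of the matching length
theorem pvLoop_eq (part1 : Bool) : ∀ (l : List Int) (a b c : Int),
    (l.foldl (fun st _ => pvStepB part1 st) (a, b, c)).2.2 = pvJuryLoopA part1 l.length a b c := by
  intro l
  induction l with
  | nil => intro a b c; rfl
  | cons x xs ih =>
      intro a b c
      simp only [List.foldl_cons, List.length_cons, pvJuryLoopA, pvStepB, pvSearch_eq]
      exact ih _ _ _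

-- ===== VERDICT (by name: the statement is the Claim_ definition above) =====
theorem jury_count_spec : Claim_equal_jury_count := by
  intro seedA seedB trials part1 _
  unfold Spec_jury_count jury_count jury_count_alt
  rw [pvLoop_eq, PySem.List.length_pyRange_one]
  norm_num
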